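-- pv_equiv track=rewrite | github.com/noel-friedrich/2.5d-crawler | maze.py | arr
-- ===== SOURCE A (Python) =====
-- def arr(f):
--     fs, ws = [], []
--     for i in range(1, len(f) - 1, 2):
--         for k in range(1, len(f[0]) - 1, 2):
--             f[i][k] = "empty"
--             fs.append([i,k])
--     for i in range(2, len(f) - 1, 2):
--         for k in range(1, len(f[0]) - 1, 2):
--             ws.append([i,k])
--     for i in range(1, len(f) - 1, 2):
--         for k in range(2, len(f[0]) - 1, 2):
--             ws.append([i,k])
--     return fs, ws
-- ===== SOURCE B (Python) =====
-- def arr(f):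
--     fs, wsA, wsB = [], [], []
--     for i in range(1, len(f) - 1):
--         for k in range(1, len(f[0]) - 1):
--             if i % 2 == 1 and k % 2 == 1:
--                 f[i][k] = "empty"
--                 fs.append([i, k])
--             elif i % 2 == 0 and k % 2 == 1:
--                 wsA.append([i, k])
--             elif i % 2 == 1 and k % 2 == 0:
--                 wsB.append([i, k])
--     return fs, wsA + wsB
-- ===== Notes on version B (the rewrite author's own statement) =====
-- stated objective: alternative
-- what changed: Replaced A's three sequential step-2 double loops with a single step-1 double loop over all interior cells that dispatches on the parity of (i,k) into fs/wsA/wsB accumulators, returning fs, wsA+wsB.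
import Mathlib
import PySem

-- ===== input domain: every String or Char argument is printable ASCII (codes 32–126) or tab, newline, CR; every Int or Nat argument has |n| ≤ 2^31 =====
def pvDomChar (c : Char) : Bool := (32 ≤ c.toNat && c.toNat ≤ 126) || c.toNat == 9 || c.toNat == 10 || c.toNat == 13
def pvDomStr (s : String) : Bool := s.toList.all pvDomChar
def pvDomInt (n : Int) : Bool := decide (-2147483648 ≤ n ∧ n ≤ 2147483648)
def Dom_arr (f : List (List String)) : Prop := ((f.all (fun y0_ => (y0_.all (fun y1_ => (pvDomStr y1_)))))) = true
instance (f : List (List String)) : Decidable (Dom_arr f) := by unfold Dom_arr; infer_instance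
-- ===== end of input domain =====

-- B replaces A's three parity-stepped double loops by one step-1 double loop dispatching
-- on cell parity into three accumulators (alternative decomposition, same cost).
-- A mutates f in place (marks floor cells "empty"); B performs the same mutation in Python;
-- the equivalence proved here is about the RETURN value only.


-- ===== PORT A =====
-- The in-place write f[i][k] = "empty" does not influence the returned lists; it is not
-- modelled (return-value equivalence only).  len(f[0]) is only read by Python when a loop
-- body runs, i.e. when len(f) ≥ 3, so headD [] is exact there.
def arr (f : List (List String)) : List (List Int) × List (List Int) :=
  let n : Int := f.length
  let w : Int := (f.headD []).length
  let fs : List (List Int) :=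
    (PySem.List.pyRange 1 (n - 1) 2).foldl (fun acc i =>
      (PySem.List.pyRange 1 (w - 1) 2).foldl (fun acc2 k => acc2 ++ [[i, k]]) acc) []
  let ws : List (List Int) :=
    (PySem.List.pyRange 2 (n - 1) 2).foldl (fun acc i =>
      (PySem.List.pyRange 1 (w - 1) 2).foldl (fun acc2 k => acc2 ++ [[i, k]]) acc) []
  let ws : List (List Int) :=
    (PySem.List.pyRange 1 (n - 1) 2).foldl (fun acc i =>
      (PySem.List.pyRange 2 (w - 1) 2).foldl (fun acc2 k => acc2 ++ [[i, k]]) acc) ws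
  (fs, ws)

-- ===== PORT B =====
def arr_alt (f : List (List String)) : List (List Int) × List (List Int) :=
  let n : Int := f.length
  let w : Int := (f.headD []).length
  let t : List (List Int) × List (List Int) × List (List Int) :=
    (PySem.List.pyRange 1 (n - 1) 1).foldl (fun acc i =>
      (PySem.List.pyRange 1 (w - 1) 1).foldl (fun acc2 k =>
        if i % 2 = 1 ∧ k % 2 = 1 then (acc2.1 ++ [[i, k]], acc2.2.1, acc2.2.2)
        else if i % 2 = 0 ∧ k % 2 = 1 then (acc2.1, acc2.2.1 ++ [[i, k]], acc2.2.2)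
        else if i % 2 = 1 ∧ k % 2 = 0 then (acc2.1, acc2.2.1, acc2.2.2 ++ [[i, k]])
        else acc2) acc) ([], [], [])
  (t.1, t.2.1 ++ t.2.2)

-- ===== PRECONDITION & SPEC =====
-- Pre_ excludes exactly the inputs where Python A raises IndexError: grids with at least
-- 3 rows and a first row of length ≥ 3 in which some odd interior row is too short for the
-- assignment f[i][k] = "empty" (k runs over the odd indices below len(f[0]) - 1).
def Pre_arr (f : List (List String)) : Prop :=
  f.length < 3 ∨ (f.headD []).length < 3 ∨
    (∀ i : Nat, i < f.length - 1 → i % 2 = 1 →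
      (f.getD i []).length ≥
        (f.headD []).length - (if (f.headD []).length % 2 = 0 then 2 else 1))
instance (f : List (List String)) : Decidable (Pre_arr f) := by unfold Pre_arr; infer_instance
def pvWitness_arr : List (List String) := [["#","#","#"],["#",".","#"],["#","#","#"]]
def Spec_arr (f : List (List String)) (out : List (List Int) × List (List Int)) : Prop := out = arr_alt f
instance (f : List (List String)) (out : List (List Int) × List (List Int)) : Decidable (Spec_arr f out) := by unfold Spec_arr; infer_instance

-- ===== CLAIM (what is proved, stated in full; the proofs are below) =====
def Claim_equal_arr : Prop := ∀ (f : List (List String)), Dom_arr f → Pre_arr f → Spec_arr f (arr f)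

-- ===== LEMMAS AND PROOFS =====

-- strict sortedness of a positive-step pyRange
theorem pairwise_lt_pyRange_two (a b : Int) :
    (PySem.List.pyRange a b 2).Pairwise (· < ·) := by
  rw [PySem.List.pyRange_of_pos a b (by norm_num)]
  rw [List.pairwise_map]
  exact (List.pairwise_lt_range).imp (by intro x y h; omega)

-- the odd elements of range(1, b) are exactly range(1, b, 2)
theorem filter_odd_pyRange (b : Int) :
    (PySem.List.pyRange 1 b 1).filter (fun x => decide (x % 2 = 1)) = PySem.List.pyRange 1 b 2 := by
  apply List.Perm.eq_of_pairwise (le := (· < ·))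
  · intro x y _ _ h1 h2; omega
  · exact (PySem.List.pairwise_lt_pyRange_one 1 b).filter _
  · exact pairwise_lt_pyRange_two 1 b
  · rw [List.perm_ext_iff_of_nodup
      ((PySem.List.nodup_pyRange_one 1 b).filter _)
      ((pairwise_lt_pyRange_two 1 b).nodup)]
    intro x
    rw [List.mem_filter, PySem.List.mem_pyRange_one,
        PySem.List.mem_pyRange_iff_of_pos (by norm_num)]
    constructor
    · rintro ⟨⟨h1, h2⟩, h3⟩
      simp only [decide_eq_true_eq] at h3
      exact ⟨h1, h2, by omega⟩
    · rintro ⟨h1, h2, ⟨c, hc⟩⟩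
      exact ⟨⟨h1, h2⟩, by simp only [decide_eq_true_eq]; omega⟩

-- the even elements of range(1, b) are exactly range(2, b, 2)
theorem filter_even_pyRange (b : Int) :
    (PySem.List.pyRange 1 b 1).filter (fun x => decide (x % 2 = 0)) = PySem.List.pyRange 2 b 2 := by
  apply List.Perm.eq_of_pairwise (le := (· < ·))
  · intro x y _ _ h1 h2; omega
  · exact (PySem.List.pairwise_lt_pyRange_one 1 b).filter _
  · exact pairwise_lt_pyRange_two 2 b
  · rw [List.perm_ext_iff_of_nodup
      ((PySem.List.nodup_pyRange_one 1 b).filter _)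
      ((pairwise_lt_pyRange_two 2 b).nodup)]
    intro x
    rw [List.mem_filter, PySem.List.mem_pyRange_one,
        PySem.List.mem_pyRange_iff_of_pos (by norm_num)]
    constructor
    · rintro ⟨⟨h1, h2⟩, h3⟩
      simp only [decide_eq_true_eq] at h3
      exact ⟨by omega, h2, by omega⟩
    · rintro ⟨h1, h2, ⟨c, hc⟩⟩
      exact ⟨⟨by omega, h2⟩, by simp only [decide_eq_true_eq]; omega⟩

-- flatMap of an if-else-nil function is flatMap over the filter
theorem flatMap_ite {α β : Type} (p : α → Prop) [DecidablePred p] (h : α → List β) (l : List α) :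
    l.flatMap (fun x => if p x then h x else []) = (l.filter (fun x => decide (p x))).flatMap h := by
  induction l with
  | nil => rfl
  | cons a l ih =>
    by_cases hp : p a <;> simp [hp, ih]

-- flatMap of a conjunction-guarded singleton: outer guard lifts out, inner guard filters
theorem flatMap_and_ite {α β : Type} (P : Prop) [Decidable P] (p : α → Prop) [DecidablePred p]
    (g : α → β) (l : List α) :
    l.flatMap (fun x => if P ∧ p x then [g x] else [])
      = if P then (l.filter (fun x => decide (p x))).map g else [] := by
  by_cases hP : P
  · simp only [hP, true_and, if_true]
    induction l with
    | nil => simp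
    | cons x l ih => by_cases hp : p x <;> simp [hp, ih]
  · simp only [hP, false_and, if_false]
    induction l with
    | nil => simp
    | cons x l ih => simp [ih]

-- a fold that appends to each component of a triple independently
theorem foldl_triple {α : Type} (g1 g2 g3 : α → List (List Int)) (l : List α)
    (a b c : List (List Int)) :
    l.foldl (fun acc x => (acc.1 ++ g1 x, acc.2.1 ++ g2 x, acc.2.2 ++ g3 x)) (a, b, c)
      = (a ++ l.flatMap g1, b ++ l.flatMap g2, c ++ l.flatMap g3) := by
  induction l generalizing a b c with
  | nil => simp
  | cons x l ih => simp [ih]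

-- B's branch body written as three independent appends
theorem branch_eq_triple (i k : Int) (acc2 : List (List Int) × List (List Int) × List (List Int)) :
    (if i % 2 = 1 ∧ k % 2 = 1 then (acc2.1 ++ [[i, k]], acc2.2.1, acc2.2.2)
     else if i % 2 = 0 ∧ k % 2 = 1 then (acc2.1, acc2.2.1 ++ [[i, k]], acc2.2.2)
     else if i % 2 = 1 ∧ k % 2 = 0 then (acc2.1, acc2.2.1, acc2.2.2 ++ [[i, k]])
     else acc2)
    = (acc2.1 ++ (if i % 2 = 1 ∧ k % 2 = 1 then [[i, k]] else []),
       acc2.2.1 ++ (if i % 2 = 0 ∧ k % 2 = 1 then [[i, k]] else []),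
       acc2.2.2 ++ (if i % 2 = 1 ∧ k % 2 = 0 then [[i, k]] else [])) := by
  rcases Int.emod_two_eq_zero_or_one i with hi | hi <;>
    rcases Int.emod_two_eq_zero_or_one k with hk | hk <;>
      simp [hi, hk]

-- A's nested step-2 fold is a flatMap of maps
theorem arrA_fold_eq (is ks : List Int) (init : List (List Int)) :
    is.foldl (fun acc i => ks.foldl (fun acc2 k => acc2 ++ [[i, k]]) acc) init
      = init ++ is.flatMap (fun i => ks.map (fun k => [i, k])) := by
  calc is.foldl (fun acc i => ks.foldl (fun acc2 k => acc2 ++ [[i, k]]) acc) init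
      = is.foldl (fun acc i => acc ++ ks.map (fun k => [i, k])) init := by
        apply PySem.List.foldl_congr_mem
        intro acc i _
        exact PySem.List.foldl_append_singleton_eq_map (fun k => [i, k]) ks acc
    _ = init ++ is.flatMap (fun i => ks.map (fun k => [i, k])) :=
        PySem.List.foldl_append_eq_flatMap _ is init

-- B's inner k-loop: the three parity-selected slices get appended to the accumulators
theorem inner_fold_eq (i : Int) (ks : List Int)
    (acc : List (List Int) × List (List Int) × List (List Int)) :
    ks.foldl (fun acc2 k =>
        if i % 2 = 1 ∧ k % 2 = 1 then (acc2.1 ++ [[i, k]], acc2.2.1, acc2.2.2)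
        else if i % 2 = 0 ∧ k % 2 = 1 then (acc2.1, acc2.2.1 ++ [[i, k]], acc2.2.2)
        else if i % 2 = 1 ∧ k % 2 = 0 then (acc2.1, acc2.2.1, acc2.2.2 ++ [[i, k]])
        else acc2) acc
      = (acc.1 ++ (if i % 2 = 1 then ((ks.filter (fun x => decide (x % 2 = 1))).map (fun k => [i, k])) else []),
         acc.2.1 ++ (if i % 2 = 0 then ((ks.filter (fun x => decide (x % 2 = 1))).map (fun k => [i, k])) else []),
         acc.2.2 ++ (if i % 2 = 1 then ((ks.filter (fun x => decide (x % 2 = 0))).map (fun k => [i, k])) else [])) := by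
  obtain ⟨a, b, c⟩ := acc
  calc ks.foldl (fun acc2 k =>
        if i % 2 = 1 ∧ k % 2 = 1 then (acc2.1 ++ [[i, k]], acc2.2.1, acc2.2.2)
        else if i % 2 = 0 ∧ k % 2 = 1 then (acc2.1, acc2.2.1 ++ [[i, k]], acc2.2.2)
        else if i % 2 = 1 ∧ k % 2 = 0 then (acc2.1, acc2.2.1, acc2.2.2 ++ [[i, k]])
        else acc2) (a, b, c)
      = ks.foldl (fun acc2 k =>
          (acc2.1 ++ (if i % 2 = 1 ∧ k % 2 = 1 then [[i, k]] else []),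
           acc2.2.1 ++ (if i % 2 = 0 ∧ k % 2 = 1 then [[i, k]] else []),
           acc2.2.2 ++ (if i % 2 = 1 ∧ k % 2 = 0 then [[i, k]] else []))) (a, b, c) := by
        apply PySem.List.foldl_congr_mem
        intro acc2 k _
        exact branch_eq_triple i k acc2
    _ = (a ++ ks.flatMap (fun k => if i % 2 = 1 ∧ k % 2 = 1 then [[i, k]] else []),
         b ++ ks.flatMap (fun k => if i % 2 = 0 ∧ k % 2 = 1 then [[i, k]] else []),
         c ++ ks.flatMap (fun k => if i % 2 = 1 ∧ k % 2 = 0 then [[i, k]] else [])) :=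
        foldl_triple _ _ _ ks a b c
    _ = _ := by
        rw [flatMap_and_ite (i % 2 = 1) (fun k => k % 2 = 1) (fun k => [i, k]) ks,
            flatMap_and_ite (i % 2 = 0) (fun k => k % 2 = 1) (fun k => [i, k]) ks,
            flatMap_and_ite (i % 2 = 1) (fun k => k % 2 = 0) (fun k => [i, k]) ks]

-- ===== VERDICT (by name: the statement is the Claim_ definition above) =====
theorem arr_spec : Claim_equal_arr := by
  intro f _ _
  unfold Spec_arr arr arr_alt
  simp only []
  set n : Int := (f.length : Int) with hn
  set w : Int := ((f.headD []).length : Int) with hw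
  -- rewrite B\'s nested fold into three flatMaps over parity filters
  rw [PySem.List.foldl_congr_mem _ _
      (fun acc i =>
        (acc.1 ++ (if i % 2 = 1 then (((PySem.List.pyRange 1 (w - 1) 1).filter (fun x => decide (x % 2 = 1))).map (fun k => [i, k])) else []),
         acc.2.1 ++ (if i % 2 = 0 then (((PySem.List.pyRange 1 (w - 1) 1).filter (fun x => decide (x % 2 = 1))).map (fun k => [i, k])) else []),
         acc.2.2 ++ (if i % 2 = 1 then (((PySem.List.pyRange 1 (w - 1) 1).filter (fun x => decide (x % 2 = 0))).map (fun k => [i, k])) else [])))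
      _ (fun acc i _ => inner_fold_eq i (PySem.List.pyRange 1 (w - 1) 1) acc)]
  rw [foldl_triple]
  rw [flatMap_ite (fun i => i % 2 = 1), flatMap_ite (fun i => i % 2 = 0),
      flatMap_ite (fun i => i % 2 = 1)]
  -- rewrite A\'s three folds into flatMaps over step-2 ranges
  rw [arrA_fold_eq, arrA_fold_eq, arrA_fold_eq]
  simp only [List.nil_append, filter_odd_pyRange, filter_even_pyRange]
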